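-- pv_equiv track=rewrite | github.com/cmrhyq/interview_questions | 20250328/questions.py | case3
-- ===== SOURCE A (Python) =====
-- def case3(num_list: list):
--     result = set()
--     for first in num_list:
--         if first == 0:
--             continue
--
--         for second in num_list:
--             if second == first:
--                  continue
--
--             for third in num_list:
--                 if third == first or third == second:
--                     continue
--
--                 number = str(first) + str(second) + str(third)
--                 result.add(number)
--
--     return result
-- ===== SOURCE B (Python) =====
-- def _perm3(vals):
--     """All ordered triples drawn from distinct positions of vals, in
--     lexicographic position order (remove-one-and-recurse enumeration)."""
--     for i, a in enumerate(vals):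
--         rest = vals[:i] + vals[i + 1:]
--         for j, b in enumerate(rest):
--             rest2 = rest[:j] + rest[j + 1:]
--             for c in rest2:
--                 yield (a, b, c)
--
--
-- def case3(num_list: list):
--     distinct = list(dict.fromkeys(num_list))
--     return {str(a) + str(b) + str(c) for (a, b, c) in _perm3(distinct) if a != 0}
-- ===== Notes on version B (the rewrite author's own statement) =====
-- stated objective: alternative
-- what changed: B first deduplicates the input (dict.fromkeys) and then enumerates ordered triples of distinct positions of that duplicate-free list with a remove-one-and-recurse permutation generator plus a single first-element-nonzero filter, replacing A's three nested scans of the raw list with value-comparison continue-skips.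
import Mathlib
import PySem

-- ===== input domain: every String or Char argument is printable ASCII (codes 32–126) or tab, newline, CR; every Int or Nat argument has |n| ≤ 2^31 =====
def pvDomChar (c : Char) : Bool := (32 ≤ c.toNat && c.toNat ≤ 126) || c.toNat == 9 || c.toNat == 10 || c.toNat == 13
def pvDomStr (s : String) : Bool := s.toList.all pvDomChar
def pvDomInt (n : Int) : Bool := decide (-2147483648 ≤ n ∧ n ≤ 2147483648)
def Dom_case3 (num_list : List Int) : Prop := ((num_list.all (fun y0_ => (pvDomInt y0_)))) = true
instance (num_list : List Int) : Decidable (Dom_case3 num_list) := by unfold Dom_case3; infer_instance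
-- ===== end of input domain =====

-- B deduplicates the input first and enumerates ordered triples of distinct POSITIONS of the
-- duplicate-free list (remove-one-and-recurse), instead of A's three nested scans of the raw
-- list with value-equality skips; objective: alternative (same result, different enumeration).

-- ===== PORT A =====
-- A returns a Python set; it is modelled as the PySem.Set of its elements (first-insertion order).
def case3 (num_list : List Int) : List String :=
  num_list.foldl (fun (result : PySem.Set String) first =>
    if first = 0 then result
    else
      num_list.foldl (fun result second =>
        if second = first then result
        else
          num_list.foldl (fun result third =>
            if third = first ∨ third = second then result
            else
              PySem.Set.add result
                (PySem.Int.toStr first ++ PySem.Int.toStr second ++ PySem.Int.toStr third))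
            result)
        result)
    PySem.Set.empty

-- ===== PORT B =====
-- _perm3: for i,a in enumerate(vals): rest = vals[:i]+vals[i+1:]; for j,b in enumerate(rest):
--   rest2 = rest[:j]+rest[j+1:]; for c in rest2: yield (a,b,c)   (slices ported with PySem.List.slice)
def pvPerm3 (vals : List Int) : List (Int × Int × Int) :=
  (PySem.List.enumerate vals).flatMap (fun p =>
    let rest := PySem.List.slice vals none (some p.1) ++ PySem.List.slice vals (some (p.1 + 1)) none
    (PySem.List.enumerate rest).flatMap (fun q =>
      let rest2 := PySem.List.slice rest none (some q.1) ++ PySem.List.slice rest (some (q.1 + 1)) none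
      rest2.map (fun c => (p.2, q.2, c))))

-- distinct = list(dict.fromkeys(num_list)); set comprehension over the filtered triples
def case3_alt (num_list : List Int) : List String :=
  let distinct := PySem.List.dedup num_list
  PySem.Set.ofList (((pvPerm3 distinct).filter (fun t => t.1 != 0)).map
    (fun t => PySem.Int.toStr t.1 ++ PySem.Int.toStr t.2.1 ++ PySem.Int.toStr t.2.2))

-- ===== PRECONDITION & SPEC =====
def Spec_case3 (num_list : List Int) (out : List String) : Prop := out = case3_alt num_list
instance (num_list : List Int) (out : List String) : Decidable (Spec_case3 num_list out) := by unfold Spec_case3; infer_instance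

-- ===== CLAIM (what is proved, stated in full; the proofs are below) =====
def Claim_equal_case3 : Prop := ∀ (num_list : List Int), Dom_case3 num_list → Spec_case3 num_list (case3 num_list)

-- ===== LEMMAS AND PROOFS =====

-- the string built from a triple
def pvS3 (a b c : Int) : String :=
  PySem.Int.toStr a ++ PySem.Int.toStr b ++ PySem.Int.toStr c

-- A's three loop bodies, named (the loop list L is a parameter)
def pvG3 (a b : Int) (s : PySem.Set String) (c : Int) : PySem.Set String :=
  if c = a ∨ c = b then s else PySem.Set.add s (pvS3 a b c)

def pvG2 (L : List Int) (a : Int) (s : PySem.Set String) (b : Int) : PySem.Set String :=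
  if b = a then s else L.foldl (pvG3 a b) s

def pvG1 (L : List Int) (s : PySem.Set String) (a : Int) : PySem.Set String :=
  if a = 0 then s else L.foldl (pvG2 L a) s

lemma case3_eq_foldl (l : List Int) : case3 l = l.foldl (pvG1 l) [] := rfl

-- first-occurrence dedup with an explicit "seen" accumulator
def pvDD (seen : List Int) : List Int → List Int
  | [] => []
  | x :: t => if x ∈ seen then pvDD seen t else x :: pvDD (x :: seen) t

lemma pvDD_congr (s₁ s₂ : List Int) (h : ∀ y, y ∈ s₁ ↔ y ∈ s₂) (l : List Int) :
    pvDD s₁ l = pvDD s₂ l := by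
  induction l generalizing s₁ s₂ with
  | nil => rfl
  | cons x t ih =>
    simp only [pvDD, (h x)]
    split
    · exact ih s₁ s₂ h
    · exact congrArg _ (ih (x :: s₁) (x :: s₂) (by intro y; simp [h y]))

lemma foldl_add_eq_append_pvDD (l : List Int) : ∀ seen,
    l.foldl PySem.Set.add seen = seen ++ pvDD seen l := by
  induction l with
  | nil => intro seen; simp [pvDD]
  | cons x t ih =>
    intro seen
    simp only [List.foldl_cons, pvDD]
    by_cases hx : x ∈ seen
    · have : PySem.Set.add seen x = seen := by
        simp [PySem.Set.add, hx]
      rw [this, ih seen, if_pos hx]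
    · have : PySem.Set.add seen x = seen ++ [x] := by
        simp [PySem.Set.add, hx]
      rw [this, ih (seen ++ [x]), if_neg hx, pvDD_congr (seen ++ [x]) (x :: seen) (by intro y; simp; tauto)]
      simp

lemma dedup_eq_pvDD (l : List Int) : PySem.List.dedup l = pvDD [] l := by
  have h := foldl_add_eq_append_pvDD l []
  simpa [PySem.List.dedup_eq_ofList, PySem.Set.ofList_eq_foldl] using h

-- a fold whose step grows the state, establishes its own strings and is idempotent once they
-- are present ignores later duplicates of its loop variable
lemma foldl_pvDD (g : PySem.Set String → Int → PySem.Set String) (T : Int → List String)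
    (hgrow : ∀ s x v, v ∈ s → v ∈ g s x)
    (hestab : ∀ s x v, v ∈ T x → v ∈ g s x)
    (hidem : ∀ s x, (∀ v ∈ T x, v ∈ s) → g s x = s) :
    ∀ (l seen : List Int) (s : PySem.Set String),
      (∀ x ∈ seen, ∀ v ∈ T x, v ∈ s) → l.foldl g s = (pvDD seen l).foldl g s := by
  intro l
  induction l with
  | nil => intro seen s _; rfl
  | cons x t ih =>
    intro seen s hseen
    simp only [List.foldl_cons, pvDD]
    by_cases hx : x ∈ seen
    · rw [if_pos hx, hidem s x (hseen x hx)]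
      exact ih seen s hseen
    · rw [if_neg hx]
      simp only [List.foldl_cons]
      refine ih (x :: seen) (g s x) ?_
      intro y hy v hv
      rcases List.mem_cons.mp hy with rfl | hy'
      · exact hestab s y v hv
      · exact hgrow s x v (hseen y hy' v hv)

lemma foldl_dedup (g : PySem.Set String → Int → PySem.Set String) (T : Int → List String)
    (hgrow : ∀ s x v, v ∈ s → v ∈ g s x)
    (hestab : ∀ s x v, v ∈ T x → v ∈ g s x)
    (hidem : ∀ s x, (∀ v ∈ T x, v ∈ s) → g s x = s)
    (l : List Int) (s : PySem.Set String) :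
    l.foldl g s = (PySem.List.dedup l).foldl g s := by
  rw [dedup_eq_pvDD]
  exact foldl_pvDD g T hgrow hestab hidem l [] s (by simp)

-- membership facts about the three loop levels
lemma mem_g3 (a b : Int) (s : PySem.Set String) (c : Int) (v : String) (hv : v ∈ s) :
    v ∈ pvG3 a b s c := by
  unfold pvG3; split
  · exact hv
  · exact (PySem.Set.mem_add s _ v).mpr (Or.inl hv)

lemma mem_foldl_g3 (a b : Int) (L : List Int) (s : PySem.Set String) (v : String)
    (hv : v ∈ s) : v ∈ L.foldl (pvG3 a b) s := by
  induction L generalizing s with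
  | nil => exact hv
  | cons x t ih => exact ih _ (mem_g3 a b s x v hv)

lemma estab_g3 (a b : Int) (L : List Int) (s : PySem.Set String) (c : Int)
    (hc : c ∈ L) (hne : ¬(c = a ∨ c = b)) : pvS3 a b c ∈ L.foldl (pvG3 a b) s := by
  induction L generalizing s with
  | nil => cases hc
  | cons x t ih =>
    rcases List.mem_cons.mp hc with rfl | hc'
    · refine mem_foldl_g3 a b t _ _ ?_
      simp only [pvG3, if_neg hne]
      exact (PySem.Set.mem_add s _ _).mpr (Or.inr rfl)
    · exact ih _ hc'

lemma idem_g3 (a b : Int) (L : List Int) (s : PySem.Set String)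
    (h : ∀ c ∈ L, ¬(c = a ∨ c = b) → pvS3 a b c ∈ s) : L.foldl (pvG3 a b) s = s := by
  induction L with
  | nil => rfl
  | cons x t ih =>
    have hx : pvG3 a b s x = s := by
      unfold pvG3; split
      · rfl
      · next hcond =>
        simp [PySem.Set.add, h x (List.mem_cons_self) hcond]
    rw [List.foldl_cons, hx]
    exact ih (fun c hc => h c (List.mem_cons_of_mem x hc))

lemma mem_foldl_g2 (L : List Int) (a : Int) (M : List Int) (s : PySem.Set String) (v : String)
    (hv : v ∈ s) : v ∈ M.foldl (pvG2 L a) s := by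
  induction M generalizing s with
  | nil => exact hv
  | cons x t ih =>
    refine ih _ ?_
    unfold pvG2; split
    · exact hv
    · exact mem_foldl_g3 a x L s v hv

lemma estab_g2 (u : List Int) (a : Int) (M : List Int) (s : PySem.Set String) (b c : Int)
    (hb : b ∈ M) (hba : b ≠ a) (hc : c ∈ u) (hcond : ¬(c = a ∨ c = b)) :
    pvS3 a b c ∈ M.foldl (pvG2 u a) s := by
  induction M generalizing s with
  | nil => cases hb
  | cons x t ih =>
    rcases List.mem_cons.mp hb with rfl | hb'
    · refine mem_foldl_g2 u a t _ _ ?_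
      simp only [pvG2, if_neg hba]
      exact estab_g3 a b u s c hc hcond
    · exact ih _ hb'

lemma idem_g2 (u : List Int) (a : Int) (M : List Int) (s : PySem.Set String)
    (h : ∀ b ∈ M, b ≠ a → ∀ c ∈ u, ¬(c = a ∨ c = b) → pvS3 a b c ∈ s) :
    M.foldl (pvG2 u a) s = s := by
  induction M with
  | nil => rfl
  | cons x t ih =>
    have hx : pvG2 u a s x = s := by
      unfold pvG2; split
      · rfl
      · next hxa => exact idem_g3 a x u s (h x List.mem_cons_self hxa)
    rw [List.foldl_cons, hx]
    exact ih (fun b hb => h b (List.mem_cons_of_mem x hb))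

-- the sets of strings a middle-loop step (resp. outer-loop step) over u is responsible for
def pvT2 (u : List Int) (a b : Int) : List String :=
  if b = a then [] else (u.filter (fun c => decide (¬(c = a ∨ c = b)))).map (pvS3 a b)

def pvT1 (u : List Int) (a : Int) : List String :=
  if a = 0 then []
  else (u.filter (fun b => decide (b ≠ a))).flatMap (fun b =>
    (u.filter (fun c => decide (¬(c = a ∨ c = b)))).map (pvS3 a b))

-- the dedup steps, innermost loop outwards
lemma inner3_dedup (a b : Int) (l : List Int) (s : PySem.Set String) :
    l.foldl (pvG3 a b) s = (PySem.List.dedup l).foldl (pvG3 a b) s := by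
  refine foldl_dedup (pvG3 a b) (fun c => if c = a ∨ c = b then [] else [pvS3 a b c]) ?_ ?_ ?_ l s
  · exact fun s x v hv => mem_g3 a b s x v hv
  · intro s x v hv
    by_cases hx : x = a ∨ x = b
    · simp [hx] at hv
    · simp [hx] at hv
      subst hv
      simp only [pvG3, if_neg hx]
      exact (PySem.Set.mem_add s _ _).mpr (Or.inr rfl)
  · intro s x h
    unfold pvG3; split
    · rfl
    · next hx =>
      have : pvS3 a b x ∈ s := h _ (by simp [hx])
      simp [PySem.Set.add, this]

lemma g2_dedup (l : List Int) (a : Int) : pvG2 l a = pvG2 (PySem.List.dedup l) a := by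
  funext s b
  unfold pvG2; split
  · rfl
  · exact inner3_dedup a b l s

lemma mid2_dedup (a : Int) (l : List Int) (s : PySem.Set String) :
    l.foldl (pvG2 (PySem.List.dedup l) a) s
      = (PySem.List.dedup l).foldl (pvG2 (PySem.List.dedup l) a) s := by
  refine foldl_dedup (pvG2 (PySem.List.dedup l) a) (pvT2 (PySem.List.dedup l) a) ?_ ?_ ?_ l s
  · exact fun s x v hv => by
      unfold pvG2; split
      · exact hv
      · exact mem_foldl_g3 a x _ s v hv
  · intro s x v hv
    unfold pvT2 at hv
    by_cases hxa : x = a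
    · simp [hxa] at hv
    · rw [if_neg hxa] at hv
      rcases List.mem_map.mp hv with ⟨c, hc, rfl⟩
      rcases List.mem_filter.mp hc with ⟨hcu, hcond⟩
      simp only [pvG2, if_neg hxa]
      exact estab_g3 a x _ s c hcu (by simpa using hcond)
  · intro s x h
    unfold pvG2; split
    · rfl
    · next hxa =>
      refine idem_g3 a x _ s ?_
      intro c hc hcond
      refine h _ ?_
      unfold pvT2
      rw [if_neg hxa]
      exact List.mem_map.mpr ⟨c, List.mem_filter.mpr ⟨hc, by simpa using hcond⟩, rfl⟩

lemma g1_dedup (l : List Int) : pvG1 l = pvG1 (PySem.List.dedup l) := by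
  funext s a
  unfold pvG1; split
  · rfl
  · rw [g2_dedup l a]
    exact mid2_dedup a l s

lemma outer1_dedup (l : List Int) (s : PySem.Set String) :
    l.foldl (pvG1 (PySem.List.dedup l)) s
      = (PySem.List.dedup l).foldl (pvG1 (PySem.List.dedup l)) s := by
  refine foldl_dedup (pvG1 (PySem.List.dedup l)) (pvT1 (PySem.List.dedup l)) ?_ ?_ ?_ l s
  · exact fun s x v hv => by
      unfold pvG1; split
      · exact hv
      · exact mem_foldl_g2 _ x _ s v hv
  · intro s x v hv
    unfold pvT1 at hv
    by_cases hx0 : x = 0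
    · simp [hx0] at hv
    · rw [if_neg hx0] at hv
      rcases List.mem_flatMap.mp hv with ⟨b, hb, hvb⟩
      rcases List.mem_filter.mp hb with ⟨hbu, hba⟩
      rcases List.mem_map.mp hvb with ⟨c, hc, rfl⟩
      rcases List.mem_filter.mp hc with ⟨hcu, hcond⟩
      simp only [pvG1, if_neg hx0]
      exact estab_g2 _ x _ s b c hbu (by simpa using hba) hcu (by simpa using hcond)
  · intro s x h
    unfold pvG1; split
    · rfl
    · next hx0 =>
      refine idem_g2 _ x _ s ?_
      intro b hb hba c hc hcond
      refine h _ ?_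
      unfold pvT1
      rw [if_neg hx0]
      exact List.mem_flatMap.mpr ⟨b, List.mem_filter.mpr ⟨hb, by simpa using hba⟩,
        List.mem_map.mpr ⟨c, List.mem_filter.mpr ⟨hc, by simpa using hcond⟩, rfl⟩⟩

-- the string sequence the nested value loops generate, in order
def pvSeq (L : List Int) : List String :=
  L.flatMap (fun a =>
    if a = 0 then []
    else
      (L.filter (fun b => b != a)).flatMap (fun b =>
        ((L.filter (fun c => c != a)).filter (fun c => c != b)).map (pvS3 a b)))

lemma foldl_add_inner (L : List Int) (a b : Int) (s : PySem.Set String) :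
    (((L.filter (fun c => c != a)).filter (fun c => c != b)).map (pvS3 a b)).foldl
        PySem.Set.add s = L.foldl (pvG3 a b) s := by
  rw [List.foldl_map, List.foldl_filter, List.foldl_filter]
  congr 1
  funext s c
  by_cases h1 : c = a <;> by_cases h2 : c = b <;> simp [pvG3, h1, h2]

lemma foldl_g1_eq_seq (L : List Int) (s : PySem.Set String) :
    L.foldl (pvG1 L) s = (pvSeq L).foldl PySem.Set.add s := by
  unfold pvSeq
  rw [List.foldl_flatMap]
  congr 1
  funext s a
  by_cases ha : a = 0
  · simp [pvG1, ha]
  · simp only [pvG1, if_neg ha]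
    rw [List.foldl_flatMap, List.foldl_filter]
    congr 1
    funext s b
    by_cases hb : b = a
    · simp [pvG2, hb]
    · simp only [pvG2, bne_iff_ne, ne_eq, hb, not_false_eq_true, if_pos]
      exact (foldl_add_inner L a b s).symm

-- "pick one element, keep the rest": the structure _perm3's slices implement
def pvPicks : List Int → List (Int × List Int)
  | [] => []
  | x :: t => (x, t) :: (pvPicks t).map (fun q => (q.1, x :: q.2))

lemma slice_erase (L : List Int) (p : Int × Int) (hp : p ∈ PySem.List.enumerate L) :
    PySem.List.slice L none (some p.1) ++ PySem.List.slice L (some (p.1 + 1)) none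
      = L.eraseIdx p.1.toNat := by
  rcases (PySem.List.mem_enumerate_iff L 0 p).mp hp with ⟨k, hk, rfl⟩
  simp only [zero_add]
  have h1 : ((k : Int) + 1) = ((k + 1 : Nat) : Int) := by push_cast; ring
  rw [h1, PySem.List.slice_to_natCast, PySem.List.slice_from_natCast]
  rw [Int.toNat_natCast]
  exact (List.eraseIdx_eq_take_drop_succ L k).symm

lemma eraseIdx_append_left_len (pre t : List Int) (x : Int) :
    (pre ++ x :: t).eraseIdx pre.length = pre ++ t := by
  induction pre with
  | nil => rfl
  | cons y ys ih => simpa [List.eraseIdx] using ih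

lemma enum_map_gen (L : List Int) : ∀ (pre : List Int),
    (PySem.List.enumerate L (pre.length : Int)).map
        (fun p => (p.2, (pre ++ L).eraseIdx p.1.toNat))
      = (pvPicks L).map (fun q => (q.1, pre ++ q.2)) := by
  induction L with
  | nil => intro pre; rfl
  | cons x t ih =>
    intro pre
    rw [PySem.List.enumerate_cons, List.map_cons]
    have h1 : ((pre.length : Int) + 1) = ((pre ++ [x]).length : Int) := by simp
    have h2 : pre ++ x :: t = (pre ++ [x]) ++ t := by simp
    have htail :
        (PySem.List.enumerate t ((pre.length : Int) + 1)).map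
            (fun p => (p.2, (pre ++ x :: t).eraseIdx p.1.toNat))
          = ((pvPicks t).map (fun q => (q.1, x :: q.2))).map (fun q => (q.1, pre ++ q.2)) := by
      rw [h1, h2, ih (pre ++ [x])]
      simp [List.map_map, Function.comp_def]
    rw [htail]
    simp only [pvPicks, List.map_cons]
    congr 1
    simp only [Int.toNat_natCast]
    exact congrArg _ (eraseIdx_append_left_len pre t x)

lemma enum_map_picks (L : List Int) :
    (PySem.List.enumerate L).map (fun p => (p.2, L.eraseIdx p.1.toNat)) = pvPicks L := by
  have h := enum_map_gen L []
  simpa using h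

lemma pv_flatMap_congr {α β : Type} (l : List α) (f g : α → List β)
    (h : ∀ x ∈ l, f x = g x) : l.flatMap f = l.flatMap g := by
  induction l with
  | nil => rfl
  | cons x t ih =>
    simp only [List.flatMap_cons, h x List.mem_cons_self]
    exact congrArg _ (ih (fun y hy => h y (List.mem_cons_of_mem x hy)))

lemma inner_picks (a : Int) (rest : List Int) :
    (PySem.List.enumerate rest).flatMap (fun q =>
        (PySem.List.slice rest none (some q.1) ++ PySem.List.slice rest (some (q.1 + 1)) none).map
          (fun c => (a, q.2, c)))
      = (pvPicks rest).flatMap (fun r => r.2.map (fun c => (a, r.1, c))) := by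
  rw [pv_flatMap_congr _ _ (fun q => (rest.eraseIdx q.1.toNat).map (fun c => (a, q.2, c)))
    (fun q hq => by rw [slice_erase rest q hq])]
  rw [← enum_map_picks rest, List.flatMap_map]

lemma perm3_picks (L : List Int) :
    pvPerm3 L = (pvPicks L).flatMap (fun q =>
      (pvPicks q.2).flatMap (fun r => r.2.map (fun c => (q.1, r.1, c)))) := by
  unfold pvPerm3
  rw [pv_flatMap_congr _ _
    (fun p => (pvPicks (L.eraseIdx p.1.toNat)).flatMap (fun r => r.2.map (fun c => (p.2, r.1, c))))
    (fun p hp => by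
      simp only
      rw [slice_erase L p hp]
      exact inner_picks p.2 (L.eraseIdx p.1.toNat))]
  rw [← enum_map_picks L, List.flatMap_map]

lemma picks_of_nodup (L : List Int) (h : L.Nodup) :
    pvPicks L = L.map (fun a => (a, L.filter (fun b => b != a))) := by
  induction L with
  | nil => rfl
  | cons x t ih =>
    rcases List.nodup_cons.mp h with ⟨hx, ht⟩
    simp only [pvPicks, List.map_cons, ih ht, List.map_map]
    congr 1
    · have hft : (x :: t).filter (fun b => b != x) = t := by
        rw [List.filter_cons_of_neg (by simp)]
        refine List.filter_eq_self.mpr (fun b hb => ?_)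
        simp only [bne_iff_ne, ne_eq]
        intro hbx
        exact hx (hbx ▸ hb)
      rw [hft]
    · apply List.map_congr_left
      intro a ha
      have hax : ¬(x = a) := fun hxa => hx (hxa ▸ ha)
      simp [hax]

lemma strsB_eq_seq (u : List Int) (h : u.Nodup) :
    ((pvPerm3 u).filter (fun t => t.1 != 0)).map
        (fun t => PySem.Int.toStr t.1 ++ PySem.Int.toStr t.2.1 ++ PySem.Int.toStr t.2.2)
      = pvSeq u := by
  rw [perm3_picks, picks_of_nodup u h, List.flatMap_map]
  rw [pv_flatMap_congr _ _
    (fun a => (u.filter (fun b => b != a)).flatMap (fun b =>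
      ((u.filter (fun c => c != a)).filter (fun c => c != b)).map (fun c => (a, b, c))))
    (fun a _ => by
      simp only
      rw [picks_of_nodup _ (h.filter _), List.flatMap_map])]
  unfold pvSeq
  rw [List.filter_flatMap, List.map_flatMap]
  refine pv_flatMap_congr _ _ _ (fun a _ => ?_)
  rw [List.filter_flatMap, List.map_flatMap]
  by_cases ha : a = 0
  · simp [ha, List.filter_map]
  · rw [if_neg ha]
    refine pv_flatMap_congr _ _ _ (fun b _ => ?_)
    rw [List.filter_map, List.map_map]
    have h1 : ((fun t : Int × Int × Int => t.1 != 0) ∘ fun c => (a, b, c)) = fun _ => true := by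
      funext c; simpa using ha
    rw [h1, List.filter_true]
    rfl

lemma case3_eq (l : List Int) : case3 l = case3_alt l := by
  rw [case3_eq_foldl, g1_dedup l]
  show List.foldl (pvG1 (PySem.List.dedup l)) [] l = _
  rw [outer1_dedup l, foldl_g1_eq_seq]
  have halt : case3_alt l = PySem.Set.ofList
      (((pvPerm3 (PySem.List.dedup l)).filter (fun t => t.1 != 0)).map
        (fun t => PySem.Int.toStr t.1 ++ PySem.Int.toStr t.2.1 ++ PySem.Int.toStr t.2.2)) := rfl
  rw [halt, strsB_eq_seq (PySem.List.dedup l) (PySem.List.nodup_dedup l), PySem.Set.ofList_eq_foldl]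

-- ===== VERDICT (by name: the statement is the Claim_ definition above) =====
theorem case3_spec : Claim_equal_case3 := by
  intro l _
  unfold Spec_case3
  exact case3_eq l
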